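-- pv_equiv track=rewrite | github.com/Manoruo/Music_Genre_Prediction | utils/genuis_functions.py | findJunk
-- ===== SOURCE A (Python) =====
-- def findJunk(sentence):
--     l = ''
--     occurances = []
--     for i, c in enumerate(sentence):
--         if l and (c.isnumeric() and l.isalpha()):
--             occurances.append(i)
--         l = c
--     return occurances
-- ===== SOURCE B (Python) =====
-- def findJunk(sentence):
--     # Staged re-implementation: first collect all numeric positions, then keep
--     # those whose predecessor character is alphabetic via random access.
--     digits = []
--     for i, c in enumerate(sentence):
--         if c.isnumeric():
--             digits.append(i)
--     return [i for i in digits if i > 0 and sentence[i - 1].isalpha()]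
-- ===== Notes on version B (the rewrite author's own statement) =====
-- stated objective: alternative
-- what changed: Replaces the single stateful pass that threads the previous character with two staged passes: pass one collects the positions of numeric characters, pass two keeps those whose predecessor (looked up by random access sentence[i-1]) is alphabetic.
import Mathlib
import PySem

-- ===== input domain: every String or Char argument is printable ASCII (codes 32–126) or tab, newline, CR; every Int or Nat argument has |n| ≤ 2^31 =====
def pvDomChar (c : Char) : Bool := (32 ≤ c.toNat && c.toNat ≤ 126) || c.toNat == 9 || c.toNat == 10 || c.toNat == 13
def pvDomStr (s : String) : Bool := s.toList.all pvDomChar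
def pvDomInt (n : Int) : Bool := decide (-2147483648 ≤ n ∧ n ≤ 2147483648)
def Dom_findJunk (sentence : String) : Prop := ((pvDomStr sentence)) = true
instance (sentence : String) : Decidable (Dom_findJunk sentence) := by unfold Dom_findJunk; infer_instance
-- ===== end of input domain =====

-- B replaces A's single stateful pass (previous character threaded through an accumulator)
-- by two staged passes: collect the positions of numeric characters, then keep those whose
-- predecessor, looked up by random access, is alphabetic (objective: alternative, same cost).
-- 'c.isnumeric()' / '.isalpha()' are ported via PySem.Chars.isdigit/isalpha/strIsalpha: exact on Dom's ASCII characters.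

-- ===== PORT A =====
-- state: (l = previous character as the chars of a Python string, occurances)
def findJunk (sentence : String) : List Int :=
  ((PySem.List.enumerate sentence.toList 0).foldl
    (fun (st : List Char × List Int) (p : Int × Char) =>
      let occ := if (!st.1.isEmpty) && (PySem.Chars.isdigit p.2 && PySem.Chars.strIsalpha st.1)
                 then st.2 ++ [p.1] else st.2
      ([p.2], occ))
    (([] : List Char), ([] : List Int))).2

-- ===== PORT B =====
-- stage 1: 'digits' = positions of numeric chars; stage 2: filter by predecessor lookup sentence[i-1]
def findJunk_alt (sentence : String) : List Int :=
  let cs := sentence.toList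
  let digits := (PySem.List.enumerate cs 0).foldl
    (fun (acc : List Int) (p : Int × Char) =>
      if PySem.Chars.isdigit p.2 then acc ++ [p.1] else acc) []
  digits.filter (fun i => decide (0 < i) &&
    (match PySem.List.pyGet? cs (i - 1) with
     | some c => PySem.Chars.isalpha c
     | none => false))

-- ===== PRECONDITION & SPEC =====
def Spec_findJunk (sentence : String) (out : List Int) : Prop := out = findJunk_alt sentence
instance (sentence : String) (out : List Int) : Decidable (Spec_findJunk sentence out) := by unfold Spec_findJunk; infer_instance

-- ===== CLAIM (what is proved, stated in full; the proofs are below) =====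
def Claim_equal_findJunk : Prop := ∀ (sentence : String), Dom_findJunk sentence → Spec_findJunk sentence (findJunk sentence)

-- ===== LEMMAS AND PROOFS =====

-- A's fold from a one-character previous state equals a pairwise scan over zipped neighbours.
lemma findJunk_fold_pairs (cs : List Char) : ∀ (x : Char) (s : Int) (acc : List Int),
    ((PySem.List.enumerate cs s).foldl
      (fun (st : List Char × List Int) (p : Int × Char) =>
        let occ := if (!st.1.isEmpty) && (PySem.Chars.isdigit p.2 && PySem.Chars.strIsalpha st.1)
                   then st.2 ++ [p.1] else st.2
        ([p.2], occ))
      ([x], acc)).2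
    = acc ++ (PySem.List.enumerate ((x :: cs).zip cs) s).filterMap
        (fun p => if PySem.Chars.isdigit p.2.2 && PySem.Chars.isalpha p.2.1 then some p.1 else none) := by
  induction cs with
  | nil => intro x s acc; simp [PySem.List.enumerate_nil]
  | cons c rest ih =>
      intro x s acc
      simp only [PySem.List.enumerate_cons, List.foldl_cons, List.zip_cons_cons, List.filterMap_cons]
      rw [ih c (s + 1)]
      by_cases h : (PySem.Chars.isdigit c && PySem.Chars.isalpha x) = true
      · simp [PySem.Chars.strIsalpha, h]
      · simp [PySem.Chars.strIsalpha, h]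

-- enumerate as a map over the index range (with an explicit default for getD).
lemma enum_range {α : Type} (d : α) (xs : List α) : ∀ (s : Int),
    PySem.List.enumerate xs s = (List.range xs.length).map (fun (j : Nat) => (s + (j : Int), xs.getD j d)) := by
  induction xs with
  | nil => intro s; simp [PySem.List.enumerate_nil]
  | cons x xs ih =>
      intro s
      simp only [PySem.List.enumerate_cons, List.length_cons, List.range_succ_eq_map,
        List.map_cons, List.map_map]
      rw [ih (s + 1)]
      refine congrArg₂ List.cons (by simp) ?_
      refine List.map_congr_left fun j hj => ?_
      simp only [Function.comp_apply, List.getD_cons_succ]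
      refine congrArg₂ Prod.mk (by push_cast; ring) rfl

-- filterMap of an if-option is map of filter.
lemma filterMap_if {α β : Type} (p : α → Bool) (f : α → β) (l : List α) :
    l.filterMap (fun a => if p a then some (f a) else none) = (l.filter p).map f := by
  induction l with
  | nil => simp
  | cons x xs ih => by_cases h : p x <;> simp [h, ih]

-- zipped neighbours, componentwise, at a valid index.
lemma zip_tail_getD (c d : Char) (rest : List Char) (j : Nat) (hj : j < rest.length) :
    ((c :: rest).zip rest).getD j (d, d) = ((c :: rest).getD j d, (c :: rest).getD (j + 1) d) := by
  have hz : j < ((c :: rest).zip rest).length := by simp [List.length_zip]; omega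
  rw [List.getD_eq_getElem _ _ hz, List.getElem_zip,
    List.getD_eq_getElem _ _ (by simp; omega), List.getD_eq_getElem _ _ (by simp; omega)]
  simp

-- ===== VERDICT (by name: the statement is the Claim_ definition above) =====
theorem findJunk_spec : Claim_equal_findJunk := by
  intro sentence _
  unfold Spec_findJunk findJunk findJunk_alt
  cases hcs : sentence.toList with
  | nil => simp [PySem.List.enumerate_nil]
  | cons c rest =>
      simp only
      -- A side: peel the first iteration, then the pairwise characterisation.
      rw [PySem.List.enumerate_cons, List.foldl_cons]
      simp only [List.isEmpty_nil, Bool.not_true, Bool.false_and, Bool.false_eq_true, if_false]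
      rw [show ((0 : Int) + 1) = 1 from rfl]
      rw [findJunk_fold_pairs rest c 1 []]
      rw [List.nil_append]
      -- B side: stage 1 is a filtered map of positions, stage 2 a filter on them.
      rw [PySem.List.foldl_append_if (fun p : Int × Char => PySem.Chars.isdigit p.2) (fun p => p.1)]
      rw [List.nil_append, List.filter_map, List.filter_filter]
      -- both sides over the index range
      rw [enum_range (' ', ' ') ((c :: rest).zip rest) 1]
      rw [List.filter_cons]
      simp only [Function.comp_apply]
      rw [if_neg (by simp)]
      rw [enum_range ' ' rest 1]
      rw [List.filterMap_map]
      simp only [Function.comp_def]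
      rw [filterMap_if (fun (j : Nat) => PySem.Chars.isdigit (((c :: rest).zip rest).getD j (' ', ' ')).2 &&
            PySem.Chars.isalpha (((c :: rest).zip rest).getD j (' ', ' ')).1) (fun (j : Nat) => 1 + (j : Int))]
      rw [List.filter_map, List.map_map]
      simp only [Function.comp_def, List.length_zip, List.length_cons]
      rw [show min (rest.length + 1) rest.length = rest.length by omega]
      refine congrArg₂ List.map rfl ?_
      refine List.filter_congr fun j hj => ?_
      have hj' : j < rest.length := List.mem_range.mp hj
      rw [zip_tail_getD c ' ' rest j hj']
      have h1 : (1 : Int) + (j : Int) - 1 = ((j : Nat) : Int) := by omega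
      rw [h1, PySem.List.pyGet?_natCast]
      rw [List.getElem?_eq_getElem (by simp; omega)]
      rw [List.getD_eq_getElem _ _ (by simp; omega), List.getD_eq_getElem _ _ (by simp; omega),
          List.getD_eq_getElem rest _ (by omega)]
      simp only [List.getElem_cons_succ]
      have : rest[j] = (c :: rest)[j + 1]'(by simp; omega) := by simp
      rw [this]
      simp [Bool.and_comm, show (0:Int) < 1 + (j:Int) by omega]
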